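-- pv_equiv track=rewrite | github.com/JHyeok/Programmers | src/main/level2/숫자_야구/solution.py | solution
-- ===== SOURCE A (Python) =====
-- def get_score(request, number):
--     strike, ball = 0, 0
--
--     for i in range(3):
--         if request[i] == number[i]:
--             strike += 1
--         elif request[i] in number:
--             ball += 1
--
--     return strike, ball
--
-- def solution(baseball):
--     answer = 0
--     possible_answer = []
--
--     # 123 - 987 까지 각 자릿수가 겹치지 않는 숫자들
--     numbers = [str(i) for i in range(1, 10)]
--     baseball_num = [
--         numbers[i] + numbers[j] + numbers[k]
--         for i in range(9)
--         for j in range(9)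
--         for k in range(9)
--         if i != j and j != k and i !=k
--     ]
--
--     for request, strike, ball in baseball:
--         baseball_num = [number for number in baseball_num if get_score(str(request), number) == (strike, ball)]
--
--     answer = len(baseball_num)
--     return answer
-- ===== SOURCE B (Python) =====
-- def clue_score(prefix, digits):
--     chars = ''.join(str(d) for d in digits)
--     strike = sum(1 for i in range(3) if prefix[i] == chars[i])
--     hits = sum(1 for i in range(3) if prefix[i] in chars)
--     return strike, hits - strike
--
--
-- def solution(baseball):
--     clues = [(str(request), (strike, ball)) for request, strike, ball in baseball]
--
--     def count(chosen, remaining):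
--         if len(chosen) == 3:
--             return 1 if all(clue_score(prefix, chosen) == score for prefix, score in clues) else 0
--         return sum(count(chosen + [d], [r for r in remaining if r != d]) for d in remaining)
--
--     return count([], list(range(1, 10)))
-- ===== Notes on version B (the rewrite author's own statement) =====
-- stated objective: alternative
-- what changed: A generates all 504 candidate strings and repeatedly reassigns a shrinking survivor list (one filter pass per clue, a stateful if/elif scoring loop); B never builds a candidate list: it backtracks recursively over the digits not yet used, preprocesses str(request) once per clue, and scores with a count-and-subtract formula (ball = membership hits - strikes).
-- outside the precondition, e.g. on solution([(123, 3, 0), (124, 3, 0), (5, 0, 0)]): A returns 0, B returns 0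
import Mathlib
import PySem

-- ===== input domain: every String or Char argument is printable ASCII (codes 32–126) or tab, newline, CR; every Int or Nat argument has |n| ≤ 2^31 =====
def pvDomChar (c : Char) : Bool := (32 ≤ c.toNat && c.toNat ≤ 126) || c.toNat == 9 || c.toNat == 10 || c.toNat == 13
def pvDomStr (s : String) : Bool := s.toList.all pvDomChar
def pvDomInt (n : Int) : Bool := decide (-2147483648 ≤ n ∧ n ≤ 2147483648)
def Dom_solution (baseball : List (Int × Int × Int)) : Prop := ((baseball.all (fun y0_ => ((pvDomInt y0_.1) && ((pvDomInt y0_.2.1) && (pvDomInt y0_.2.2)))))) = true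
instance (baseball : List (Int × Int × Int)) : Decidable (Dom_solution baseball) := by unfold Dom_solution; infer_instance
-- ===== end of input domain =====

-- B replaces A's generate-all-504-strings-then-filter-once-per-clue scheme by recursive
-- backtracking over the digits not yet used (digit triples, no candidate list is ever kept)
-- with str(request) computed once per clue and a count-and-subtract score formula
-- (ball = hits - strike) instead of A's stateful if/elif loop; alternative decomposition,
-- same cost.

-- ===== PORT A =====
-- get_score of Source A (positional loop: strike on equal, elif ball on membership)
def pvGetScore (request number : List Char) : Int × Int :=
  (PySem.List.pyRange 0 3 1).foldl
    (fun (sb : Int × Int) i =>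
      if PySem.List.pyGetD request i ' ' = PySem.List.pyGetD number i ' ' then (sb.1 + 1, sb.2)
      else if PySem.Chars.isIn [PySem.List.pyGetD request i ' '] number then (sb.1, sb.2 + 1)
      else sb)
    ((0 : Int), (0 : Int))

-- the 504 candidate strings of Source A
def pvCandidates : List (List Char) :=
  let numbers : List (List Char) := (PySem.List.pyRange 1 10 1).map PySem.Int.toChars
  (PySem.List.pyRange 0 9 1).flatMap fun i =>
    (PySem.List.pyRange 0 9 1).flatMap fun j =>
      (PySem.List.pyRange 0 9 1).flatMap fun k =>
        if i ≠ j ∧ j ≠ k ∧ i ≠ k then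
          [PySem.List.pyGetD numbers i [] ++ PySem.List.pyGetD numbers j [] ++ PySem.List.pyGetD numbers k []]
        else []

def solution (baseball : List (Int × Int × Int)) : Int :=
  let final := baseball.foldl
    (fun cur c =>
      cur.filter (fun number => pvGetScore (PySem.Int.toChars c.1) number == (c.2.1, c.2.2)))
    pvCandidates
  PySem.List.len final

-- ===== PORT B =====
-- clue_score of Source B: strike and membership hits counted positionally by two 0/1-sums
-- (List.countP), ball = hits - strike ('p in chars' for the 1-char p is Python substring
-- membership, PySem.Chars.isIn; prefix[i] raises on a short prefix, excluded by Pre_)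
def pvClueScore (pre : List Char) (digits : List Int) : Int × Int :=
  let chars : List Char := digits.flatMap PySem.Int.toChars
  let strike : Int := (((PySem.List.pyRange 0 3 1).countP
    (fun i => PySem.List.pyGetD pre i ' ' == PySem.List.pyGetD chars i ' ')) : Nat)
  let hits : Int := (((PySem.List.pyRange 0 3 1).countP
    (fun i => PySem.Chars.isIn [PySem.List.pyGetD pre i ' '] chars)) : Nat)
  (strike, hits - strike)

-- count of Source B: recursive backtracking over the digits not used yet
def pvCount (clues : List (List Char × (Int × Int))) (chosen remaining : List Int) : Int :=
  if chosen.length == 3 then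
    if clues.all (fun c => pvClueScore c.1 chosen == c.2) then 1 else 0
  else
    (remaining.attach.map (fun d =>
      pvCount clues (chosen ++ [d.1]) (remaining.filter (fun r => r ≠ d.1)))).sum
termination_by remaining.length
decreasing_by
  rw [List.length_unattach, ← List.length_attach (l := remaining)]
  exact List.length_filter_lt_length_iff_exists.mpr ⟨d, List.mem_attach _ _, by simp⟩

def solution_alt (baseball : List (Int × Int × Int)) : Int :=
  let clues := baseball.map (fun c => (PySem.Int.toChars c.1, (c.2.1, c.2.2)))
  pvCount clues [] (PySem.List.pyRange 1 10 1)

-- ===== PRECONDITION & SPEC =====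
-- Pre_ excludes inputs containing a request whose str() has fewer than 3 characters
-- (equivalently -9 <= request <= 99) that is not preceded by a facially impossible clue
-- (negative strike or ball, or strike+ball > 3, which no candidate ever matches, so the
-- survivor list is empty): on such inputs Python A raises IndexError whenever a candidate
-- survives the preceding clues (on the remaining excluded inputs both programs return 0
-- identically).
def Pre_solution (baseball : List (Int × Int × Int)) : Prop :=
  ∀ t, (h : t < baseball.length) →
    (PySem.Int.toChars (baseball[t]).1).length < 3 →
    (baseball.take t).any
      (fun c => decide (c.2.1 < 0) || decide (c.2.2 < 0) || decide (3 < c.2.1 + c.2.2)) = true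
instance (baseball : List (Int × Int × Int)) : Decidable (Pre_solution baseball) := by
  unfold Pre_solution; infer_instance
def pvWitness_solution : (List (Int × Int × Int)) := [(123, 1, 1)]
def Spec_solution (baseball : List (Int × Int × Int)) (out : Int) : Prop := out = solution_alt baseball
instance (baseball : List (Int × Int × Int)) (out : Int) : Decidable (Spec_solution baseball out) := by unfold Spec_solution; infer_instance

-- ===== CLAIM (what is proved, stated in full; the proofs are below) =====
def Claim_equal_solution : Prop := ∀ (baseball : List (Int × Int × Int)), Dom_solution baseball → Pre_solution baseball → Spec_solution baseball (solution baseball)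

-- ===== LEMMAS AND PROOFS =====

-- A's shrinking-filter fold is a single count over the initial candidates
theorem pv_foldl_filter_len (p : (Int × Int × Int) → List Char → Bool) :
    ∀ (bs : List (Int × Int × Int)) (cands : List (List Char)),
      PySem.List.len (bs.foldl (fun cur c => cur.filter (p c)) cands)
        = ((cands.countP (fun n => bs.all (fun c => p c n)) : Nat) : Int) := by
  intro bs
  induction bs with
  | nil => intro cands; simp [PySem.List.len_eq, List.countP_true]
  | cons c bs ih =>
    intro cands
    rw [List.foldl_cons, ih, List.countP_filter]
    congr 1
    apply List.countP_congr
    intro n _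
    simp [Bool.and_comm]

-- fuel-indexed completion list mirroring pvCount's recursion (proof-side helper)
def pvExtend (fuel : Nat) (chosen remaining : List Int) : List (List Int) :=
  match fuel with
  | 0 => []
  | fuel + 1 =>
    if chosen.length == 3 then [chosen]
    else remaining.flatMap (fun d => pvExtend fuel (chosen ++ [d]) (remaining.filter (fun r => r ≠ d)))

-- pvCount counts, among the completions, those satisfying every clue
theorem pvCount_eq_countP (clues : List (List Char × (Int × Int))) :
    ∀ (fuel : Nat) (chosen remaining : List Int), remaining.length < fuel →
      pvCount clues chosen remaining
        = (((pvExtend fuel chosen remaining).countP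
            (fun t => clues.all (fun c => pvClueScore c.1 t == c.2)) : Nat) : Int) := by
  intro fuel
  induction fuel with
  | zero => intro _ _ h; omega
  | succ fuel ih =>
    intro chosen remaining hlen
    rw [pvCount.eq_def, pvExtend]
    by_cases h3 : (chosen.length == 3) = true
    · simp only [h3, if_true, List.countP_cons, List.countP_nil]
      split <;> simp_all
    · simp only [h3, Bool.false_eq_true, if_false]
      have hflat : ∀ (l : List Int) (g : Int → List (List Int)) (p : List Int → Bool),
          ((((l.flatMap g).countP p : Nat)) : Int) = (l.map (fun d => (((g d).countP p : Nat) : Int))).sum := by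
        intro l g p
        induction l with
        | nil => simp
        | cons d l ihl => simp [List.countP_append, ihl]
      rw [hflat]
      conv_rhs => rw [← List.attach_map_val]
      congr 1
      apply List.map_congr_left
      intro d _
      apply ih
      have hlt : (remaining.filter (fun r => r ≠ d.1)).length < remaining.length :=
        List.length_filter_lt_length_iff_exists.mpr ⟨d.1, d.2, by simp⟩
      omega

-- Source A's candidate strings are exactly Source B's digit triples, rendered as strings, in order
set_option maxRecDepth 10000 in
theorem pvCandidates_eq :
    pvCandidates = (pvExtend 10 [] (PySem.List.pyRange 1 10 1)).map (fun t => t.flatMap PySem.Int.toChars) := by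
  decide

-- every completion renders as a 3-character string
set_option maxRecDepth 10000 in
theorem pvTriples_len :
    ((pvExtend 10 [] (PySem.List.pyRange 1 10 1)).all (fun t => (t.flatMap PySem.Int.toChars).length == 3)) = true := by
  decide

-- 'p in chars' for a single character is list membership
theorem pv_isIn_singleton (p : Char) (l : List Char) : PySem.Chars.isIn [p] l = l.contains p := by
  rw [Bool.eq_iff_iff, PySem.Chars.isIn_iff_infix, List.contains_iff_mem, List.singleton_infix_iff]

-- the crux: on any request string, A's positional if/elif score over a 3-character candidate
-- equals B's count-and-subtract score over the candidate's digit triple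
set_option maxHeartbeats 2000000 in
theorem pv_score_eq (q : List Char) (t : List Int) (n0 n1 n2 : Char)
    (ht : t.flatMap PySem.Int.toChars = [n0, n1, n2]) :
    pvGetScore q [n0, n1, n2] = pvClueScore q t := by
  have h3 : PySem.List.pyRange 0 3 1 = [0, 1, 2] := by decide
  unfold pvGetScore pvClueScore
  rw [ht, h3]
  have m0 : PySem.List.pyGetD [n0, n1, n2] (0:Int) ' ' = n0 := by simp [pysem]
  have m1 : PySem.List.pyGetD [n0, n1, n2] (1:Int) ' ' = n1 := by simp [pysem]
  have m2 : PySem.List.pyGetD [n0, n1, n2] (2:Int) ' ' = n2 := by simp [pysem]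
  simp only [List.foldl, List.countP_cons, List.countP_nil, m0, m1, m2]
  generalize PySem.List.pyGetD q (0:Int) ' ' = x0
  generalize PySem.List.pyGetD q (1:Int) ' ' = x1
  generalize PySem.List.pyGetD q (2:Int) ' ' = x2
  simp only [beq_iff_eq]
  split_ifs <;> simp_all [pv_isIn_singleton]

-- pointwise: a candidate satisfies A's clue test iff its digit triple satisfies B's
theorem pv_all_eq (baseball : List (Int × Int × Int))
    (t : List Int) (ht : t ∈ pvExtend 10 [] (PySem.List.pyRange 1 10 1)) :
    baseball.all (fun c => pvGetScore (PySem.Int.toChars c.1) (t.flatMap PySem.Int.toChars) == (c.2.1, c.2.2))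
      = baseball.all (fun c => pvClueScore (PySem.Int.toChars c.1) t == (c.2.1, c.2.2)) := by
  have hlen3 : (t.flatMap PySem.Int.toChars).length = 3 := by
    have := List.all_eq_true.mp pvTriples_len t ht
    simpa using this
  obtain ⟨n0, n1, n2, hft⟩ : ∃ n0 n1 n2, t.flatMap PySem.Int.toChars = [n0, n1, n2] := by
    match hh : t.flatMap PySem.Int.toChars, hlen3 with
    | [n0, n1, n2], _ => exact ⟨n0, n1, n2, rfl⟩
  apply congrArg
  funext c
  rw [hft, pv_score_eq (PySem.Int.toChars c.1) t n0 n1 n2 hft]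

-- ===== VERDICT (by name: the statement is the Claim_ definition above) =====
theorem solution_spec : Claim_equal_solution := by
  intro baseball _ hpre
  unfold Spec_solution solution solution_alt
  rw [pv_foldl_filter_len (fun c number => pvGetScore (PySem.Int.toChars c.1) number == (c.2.1, c.2.2))
        baseball pvCandidates,
      pvCount_eq_countP _ 10 [] (PySem.List.pyRange 1 10 1) (by decide)]
  congr 1
  rw [pvCandidates_eq, List.countP_map]
  simp only [List.all_map, Function.comp_def]
  apply List.countP_congr
  intro t ht
  rw [pv_all_eq baseball t ht]
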